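-- pv_equiv track=rewrite | github.com/shanebishop/comp1405-tutorial-8 | t8e7-matrix-dimensions.py | sameSize
-- ===== SOURCE A (Python) =====
-- def sameSize(x, y):
-- 	# If the lengths differ, return false
-- 	if len(x) != len(y):
-- 		return False
-- 	else:
-- 		# If the lengths of x[i] and y[i] ever differ, return False
-- 		for i in range(len(x)):
-- 			if len(x[i]) != len(y[i]):
-- 				return False
--
-- 		# Otherwise, return true
-- 		return True
-- ===== SOURCE B (Python) =====
-- def sameSize(x, y):
--     # Structural recursion on both matrices at once: no explicit length
--     # guard and no indexing -- empty/non-empty mismatch is the base case.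
--     if not x or not y:
--         return not x and not y
--     return len(x[0]) == len(y[0]) and sameSize(x[1:], y[1:])
-- ===== Notes on version B (the rewrite author's own statement) =====
-- stated objective: alternative
-- what changed: Replaces A's explicit outer length guard plus indexed early-exit loop with structural recursion that destructures both matrices simultaneously: an outer-dimension mismatch surfaces as an empty/non-empty base case and no index or len(x)==len(y) comparison exists at all.
import Mathlib
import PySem

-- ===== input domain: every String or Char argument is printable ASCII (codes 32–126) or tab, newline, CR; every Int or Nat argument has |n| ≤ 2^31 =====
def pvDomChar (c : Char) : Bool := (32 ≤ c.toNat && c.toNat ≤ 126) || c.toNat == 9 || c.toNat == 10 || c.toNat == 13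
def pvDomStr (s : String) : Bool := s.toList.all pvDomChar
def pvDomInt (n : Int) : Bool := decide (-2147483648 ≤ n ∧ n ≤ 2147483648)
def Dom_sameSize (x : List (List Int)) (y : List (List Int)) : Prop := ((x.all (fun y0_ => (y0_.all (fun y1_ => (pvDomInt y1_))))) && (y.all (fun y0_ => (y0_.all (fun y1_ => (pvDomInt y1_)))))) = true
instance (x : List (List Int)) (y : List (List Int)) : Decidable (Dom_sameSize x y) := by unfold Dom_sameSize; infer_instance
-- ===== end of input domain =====

-- B replaces A's outer length guard + indexed early-exit loop with structural
-- recursion destructuring both matrices at once (objective: alternative).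

-- ===== PORT A =====
-- the early-exit 'for i in range(len(x))' loop, recursing over the index list
def sameSizeLoop (x : List (List Int)) (y : List (List Int)) : List Int → Bool
  | [] => true
  | i :: is =>
    if (PySem.List.pyGet? x i).map List.length ≠ (PySem.List.pyGet? y i).map List.length then false
    else sameSizeLoop x y is

def sameSize (x : List (List Int)) (y : List (List Int)) : Bool :=
  if x.length ≠ y.length then false
  else sameSizeLoop x y (PySem.List.pyRange 0 x.length 1)

-- ===== PORT B =====
-- 'if not x or not y: return not x and not y; return len(x[0])==len(y[0]) and sameSize(x[1:],y[1:])'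
def sameSize_alt : List (List Int) → List (List Int) → Bool
  | [], [] => true
  | [], _ :: _ => false
  | _ :: _, [] => false
  | xh :: xt, yh :: yt => (xh.length == yh.length) && sameSize_alt xt yt

-- ===== PRECONDITION & SPEC =====
def Spec_sameSize (x : List (List Int)) (y : List (List Int)) (out : Bool) : Prop := out = sameSize_alt x y
instance (x : List (List Int)) (y : List (List Int)) (out : Bool) : Decidable (Spec_sameSize x y out) := by unfold Spec_sameSize; infer_instance

-- ===== CLAIM (what is proved, stated in full; the proofs are below) =====
def Claim_equal_sameSize : Prop := ∀ (x : List (List Int)) (y : List (List Int)), Dom_sameSize x y → Spec_sameSize x y (sameSize x y)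

-- ===== LEMMAS AND PROOFS =====

-- B computes equality of the two row-length lists
theorem sameSize_alt_eq_map (x : List (List Int)) :
    ∀ y : List (List Int), sameSize_alt x y = ((x.map List.length) == (y.map List.length)) := by
  induction x with
  | nil => intro y; cases y <;> simp [sameSize_alt]
  | cons xh xt ih =>
    intro y
    cases y with
    | nil => simp [sameSize_alt]
    | cons yh yt => simp [sameSize_alt, ih]

-- the loop checks equality of row lengths at every index of the range
theorem sameSizeLoop_eq_all (x y : List (List Int)) (is : List Int) :
    sameSizeLoop x y is =
      is.all (fun i => (PySem.List.pyGet? x i).map List.length == (PySem.List.pyGet? y i).map List.length) := by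
  induction is with
  | nil => rfl
  | cons i is ih =>
    simp only [sameSizeLoop, List.all_cons, ih]
    by_cases h : (PySem.List.pyGet? x i).map List.length = (PySem.List.pyGet? y i).map List.length
    · simp [h]
    · simp [h]

theorem map_length_ext (x y : List (List Int)) (hlen : x.length = y.length)
    (h : ∀ i : Nat, i < x.length →
      (PySem.List.pyGet? x (i : Int)).map List.length = (PySem.List.pyGet? y (i : Int)).map List.length) :
    x.map List.length = y.map List.length := by
  apply List.ext_getElem (by simpa using hlen)
  intro i h1 h2
  have := h i (by simpa using h1)
  rw [PySem.List.pyGet?_natCast, PySem.List.pyGet?_natCast] at this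
  simp only [List.length_map] at h1 h2
  simp only [List.getElem?_eq_getElem h1, List.getElem?_eq_getElem h2, Option.map_some] at this
  simpa using this

-- ===== VERDICT (by name: the statement is the Claim_ definition above) =====
theorem sameSize_spec : Claim_equal_sameSize := by
  intro x y _
  unfold Spec_sameSize sameSize
  rw [sameSize_alt_eq_map]
  by_cases hlen : x.length = y.length
  · simp only [hlen, ne_eq, not_true_eq_false, if_false]
    rw [sameSizeLoop_eq_all, ← hlen]
    by_cases hall : ∀ i : Nat, i < x.length →
        (PySem.List.pyGet? x (i : Int)).map List.length = (PySem.List.pyGet? y (i : Int)).map List.length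
    · have heq := map_length_ext x y hlen hall
      rw [heq]
      simp only [beq_self_eq_true]
      rw [List.all_eq_true]
      intro i hi
      have hmem := hi
      rw [PySem.List.mem_pyRange_one] at hmem
      obtain ⟨h0, hlt⟩ := hmem
      obtain ⟨n, rfl⟩ : ∃ n : Nat, i = (n : Int) := ⟨i.toNat, by omega⟩
      have h := hall n (by exact_mod_cast hlt)
      rw [PySem.List.pyGet?_natCast, PySem.List.pyGet?_natCast] at h
      simp [h]
    · simp only [not_forall] at hall
      obtain ⟨i, hi, hne⟩ := hall
      have h1 : ((i : Int) ∈ PySem.List.pyRange 0 x.length 1) := by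
        rw [PySem.List.mem_pyRange_one]; omega
      rw [List.all_eq_false.mpr ⟨(i : Int), h1, by simpa using hne⟩]
      have : x.map List.length ≠ y.map List.length := by
        intro hc
        apply hne
        rw [PySem.List.pyGet?_natCast, PySem.List.pyGet?_natCast]
        have : x[i]?.map List.length = y[i]?.map List.length := by
          calc x[i]?.map List.length = (x.map List.length)[i]? := by simp
            _ = (y.map List.length)[i]? := by rw [hc]
            _ = y[i]?.map List.length := by simp
        exact this
      simp [this]
  · have : x.map List.length ≠ y.map List.length := fun hc => hlen (by simpa using congrArg List.length hc)
    simp [hlen, this]
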